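-- pv_equiv track=rewrite | github.com/SamuelArangoIzad/Hexa-Bina | 001/subtraction.py | resta_hexadecimal
-- ===== SOURCE A (Python) =====
-- def completar_con_ceros(cadena, longitud_deseada):
--     if len(cadena) >= longitud_deseada:
--         return cadena
--     else:
--         ceros_necesarios = longitud_deseada - len(cadena)
--         return "0" * ceros_necesarios + cadena
--
-- def resta_hexadecimal(numero1, numero2):
--     diccionario_hex = {'0': 0, '1': 1, '2': 2, '3': 3, '4': 4, '5': 5, '6': 6, '7': 7, '8': 8, '9': 9,
--                        'A': 10, 'B': 11, 'C': 12, 'D': 13, 'E': 14, 'F': 15}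
--
--     longitud_maxima = max(len(numero1), len(numero2))
--
--     numero1 = completar_con_ceros(numero1, longitud_maxima)
--
--
--     numero2 = completar_con_ceros(numero2, longitud_maxima)
--
--     resultado = ""
--
--     prestamo = 0
--
--     for ii in range(longitud_maxima - 1, -1, -1):
--         digito1 = numero1[ii]
--
--
--         digito2 = numero2[ii]
--
--         valor1 = diccionario_hex[digito1]
--
--
--         valor2 = diccionario_hex[digito2]
--
--         """
--         ACA ESTA LO INTERESANTE DONDE SI DIFERENCIA TEMPORAL SUS VALORES CALCULADOS
--         TENIENDO EN CUENTA EL PRESTAMO ES NUMERO -NEGATIVO QUIERE DECIR QUE EL NUMERO 1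
--         ES MENOR QUE EL NUMERO 2 Y COMO NO HAY SUFICIENTE ACARREO EN POSICIONES ANTERIOR
--         COMPENSA LA DIFERENCIA CON += 16 SOLICITANDO PRESTADO AL DE AL LADO
--         PARA COMPENSAR DIFERENCIA NEGATIVA
--
--         """
--
--
--
--         diferencia_temporal = valor1 - valor2 - prestamo
--
--         if diferencia_temporal < 0:
--
--
--             prestamo = 1
--
--
--             diferencia_temporal += 16
--
--         else:
--             prestamo = 0
--
--
--
--         resultado = (hex(diferencia_temporal)[2:] + resultado)
--
--
--
--     return resultado
-- ===== SOURCE B (Python) =====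
-- def resta_hexadecimal(numero1, numero2):
--     longitud = max(len(numero1), len(numero2))
--     if longitud == 0:
--         return ""
--     valor1 = int("0" + numero1, 16)
--     valor2 = int("0" + numero2, 16)
--     return format((valor1 - valor2) % (16 ** longitud), "0{}x".format(longitud))
-- ===== Notes on version B (the rewrite author's own statement) =====
-- stated objective: simpler
-- what changed: Replaces the digit-by-digit borrow loop over zero-padded strings by one closed-form modular computation: diff = (int(n1,16) - int(n2,16)) mod 16**L rendered as L zero-padded lowercase hex digits.
import Mathlib
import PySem

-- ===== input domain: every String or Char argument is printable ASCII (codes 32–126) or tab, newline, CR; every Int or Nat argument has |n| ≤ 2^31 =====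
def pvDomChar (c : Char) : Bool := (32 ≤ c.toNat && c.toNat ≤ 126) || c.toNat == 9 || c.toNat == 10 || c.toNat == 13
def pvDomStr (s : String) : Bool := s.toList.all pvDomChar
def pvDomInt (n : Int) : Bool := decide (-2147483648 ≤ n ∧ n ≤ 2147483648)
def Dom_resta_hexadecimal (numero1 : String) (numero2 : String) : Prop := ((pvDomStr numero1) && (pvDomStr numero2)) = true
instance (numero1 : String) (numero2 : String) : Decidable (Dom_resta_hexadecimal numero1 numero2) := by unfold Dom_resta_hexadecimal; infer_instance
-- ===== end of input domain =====

-- B replaces A's digit-by-digit borrow loop over the zero-padded strings by the closed form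
-- (value1 - value2) mod 16^L rendered as L zero-padded lowercase hex digits (objective: simpler).

-- ===== PORT A =====
-- hex(n)[2:] for 0 ≤ n < 16 (the only values either program feeds it): one lowercase hex digit
def pvHexDigit (n : Int) : List Char :=
  match PySem.List.pyGet? "0123456789abcdef".toList n with
  | some c => [c]
  | none => []

def diccionario_hex : PySem.Dict Char Int := PySem.Dict.ofList
  [('0',0),('1',1),('2',2),('3',3),('4',4),('5',5),('6',6),('7',7),('8',8),('9',9),
   ('A',10),('B',11),('C',12),('D',13),('E',14),('F',15)]

def completar_con_ceros (cadena : String) (longitud_deseada : Int) : String :=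
  if longitud_deseada ≤ PySem.Str.len cadena then cadena
  else -- "0" * ceros_necesarios + cadena
    String.ofList (List.replicate (longitud_deseada - PySem.Str.len cadena).toNat '0' ++ cadena.toList)

-- 'for ii in range(longitud_maxima - 1, -1, -1): …' as a countdown recursion on ii
-- (fuel k+1 processes index ii = k); resultado is carried as a List Char
def pvLoopA (numero1 numero2 : List Char) : Nat → List Char × Int → List Char × Int
  | 0, st => st
  | k+1, (resultado, prestamo) =>
    let digito1 := (PySem.List.pyGet? numero1 (k : Int)).getD ' '   -- index always in range at every call
    let digito2 := (PySem.List.pyGet? numero2 (k : Int)).getD ' '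
    let valor1 := (diccionario_hex.get? digito1).getD 0             -- none = KeyError, excluded by Pre_
    let valor2 := (diccionario_hex.get? digito2).getD 0
    let diferencia_temporal := valor1 - valor2 - prestamo
    if diferencia_temporal < 0 then
      pvLoopA numero1 numero2 k (pvHexDigit (diferencia_temporal + 16) ++ resultado, 1)
    else
      pvLoopA numero1 numero2 k (pvHexDigit diferencia_temporal ++ resultado, 0)

def resta_hexadecimal (numero1 : String) (numero2 : String) : String :=
  let longitud_maxima : Int := max (PySem.Str.len numero1) (PySem.Str.len numero2)
  let n1 := completar_con_ceros numero1 longitud_maxima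
  let n2 := completar_con_ceros numero2 longitud_maxima
  String.ofList (pvLoopA n1.toList n2.toList longitud_maxima.toNat ([], 0)).1

-- ===== PORT B =====
-- value of one hex digit as int(·, 16) reads it; exact on Pre_'s uppercase-hex-digit domain
def pvHexVal (c : Char) : Int :=
  if c = '0' then 0 else if c = '1' then 1 else if c = '2' then 2 else if c = '3' then 3
  else if c = '4' then 4 else if c = '5' then 5 else if c = '6' then 6 else if c = '7' then 7
  else if c = '8' then 8 else if c = '9' then 9 else if c = 'A' then 10 else if c = 'B' then 11
  else if c = 'C' then 12 else if c = 'D' then 13 else if c = 'E' then 14 else if c = 'F' then 15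
  else 0

-- format(m, "0{L}x") for 0 ≤ m < 16^L: exactly L zero-padded lowercase hex digits
def pvPadHex : Int → Nat → List Char
  | _, 0 => []
  | m, k+1 => pvPadHex (m / 16) k ++ pvHexDigit (m % 16)

def resta_hexadecimal_alt (numero1 : String) (numero2 : String) : String :=
  let longitud : Int := max (PySem.Str.len numero1) (PySem.Str.len numero2)
  if longitud = 0 then ""
  else
    -- int("0" + numeroN, 16), exact on Pre_'s hex-digit strings
    let valor1 := numero1.toList.foldl (fun a c => 16 * a + pvHexVal c) 0
    let valor2 := numero2.toList.foldl (fun a c => 16 * a + pvHexVal c) 0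
    String.ofList (pvPadHex (PySem.Int.mod (valor1 - valor2) (16 ^ longitud.toNat)) longitud.toNat)

-- ===== PRECONDITION & SPEC =====
-- Pre_ excludes exactly the inputs with a character outside '0'-'9'/'A'-'F', on which A raises KeyError.
def Pre_resta_hexadecimal (numero1 : String) (numero2 : String) : Prop :=
  (numero1.toList.all (fun c => "0123456789ABCDEF".toList.contains c)
    && numero2.toList.all (fun c => "0123456789ABCDEF".toList.contains c)) = true
instance (numero1 : String) (numero2 : String) : Decidable (Pre_resta_hexadecimal numero1 numero2) := by
  unfold Pre_resta_hexadecimal; infer_instance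
def pvWitness_resta_hexadecimal : String × String := ("1A", "0F")

def Spec_resta_hexadecimal (numero1 : String) (numero2 : String) (out : String) : Prop := out = resta_hexadecimal_alt numero1 numero2
instance (numero1 : String) (numero2 : String) (out : String) : Decidable (Spec_resta_hexadecimal numero1 numero2 out) := by unfold Spec_resta_hexadecimal; infer_instance

-- ===== CLAIM (what is proved, stated in full; the proofs are below) =====
def Claim_equal_resta_hexadecimal : Prop := ∀ (numero1 : String) (numero2 : String), Dom_resta_hexadecimal numero1 numero2 → Pre_resta_hexadecimal numero1 numero2 → Spec_resta_hexadecimal numero1 numero2 (resta_hexadecimal numero1 numero2)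

-- ===== LEMMAS AND PROOFS =====

-- the dict lookup (with default 0 for the keys Pre_ excludes) agrees with B's digit-value helper
theorem hexval_eq (c : Char) : (diccionario_hex.get? c).getD 0 = pvHexVal c := by
  have hd : diccionario_hex = PySem.Dict.mk
    [('0',0),('1',1),('2',2),('3',3),('4',4),('5',5),('6',6),('7',7),('8',8),('9',9),
     ('A',10),('B',11),('C',12),('D',13),('E',14),('F',15)] := by decide
  by_cases h0 : c = '0'
  · subst h0; decide
  by_cases h1 : c = '1'
  · subst h1; decide
  by_cases h2 : c = '2'
  · subst h2; decide
  by_cases h3 : c = '3'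
  · subst h3; decide
  by_cases h4 : c = '4'
  · subst h4; decide
  by_cases h5 : c = '5'
  · subst h5; decide
  by_cases h6 : c = '6'
  · subst h6; decide
  by_cases h7 : c = '7'
  · subst h7; decide
  by_cases h8 : c = '8'
  · subst h8; decide
  by_cases h9 : c = '9'
  · subst h9; decide
  by_cases h10 : c = 'A'
  · subst h10; decide
  by_cases h11 : c = 'B'
  · subst h11; decide
  by_cases h12 : c = 'C'
  · subst h12; decide
  by_cases h13 : c = 'D'
  · subst h13; decide
  by_cases h14 : c = 'E'
  · subst h14; decide
  by_cases h15 : c = 'F'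
  · subst h15; decide
  simp [hd, PySem.Dict.get?_mk_cons, PySem.Dict.get?, pvHexVal, h0, h1, h2, h3, h4, h5, h6, h7, h8, h9, h10, h11, h12, h13, h14, h15, Ne.symm h0, Ne.symm h1, Ne.symm h2, Ne.symm h3, Ne.symm h4, Ne.symm h5, Ne.symm h6, Ne.symm h7, Ne.symm h8, Ne.symm h9, Ne.symm h10, Ne.symm h11, Ne.symm h12, Ne.symm h13, Ne.symm h14, Ne.symm h15]

theorem pvHexVal_bounds (c : Char) : 0 ≤ pvHexVal c ∧ pvHexVal c < 16 := by
  by_cases h0 : c = '0'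
  · subst h0; decide
  by_cases h1 : c = '1'
  · subst h1; decide
  by_cases h2 : c = '2'
  · subst h2; decide
  by_cases h3 : c = '3'
  · subst h3; decide
  by_cases h4 : c = '4'
  · subst h4; decide
  by_cases h5 : c = '5'
  · subst h5; decide
  by_cases h6 : c = '6'
  · subst h6; decide
  by_cases h7 : c = '7'
  · subst h7; decide
  by_cases h8 : c = '8'
  · subst h8; decide
  by_cases h9 : c = '9'
  · subst h9; decide
  by_cases h10 : c = 'A'
  · subst h10; decide
  by_cases h11 : c = 'B'
  · subst h11; decide
  by_cases h12 : c = 'C'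
  · subst h12; decide
  by_cases h13 : c = 'D'
  · subst h13; decide
  by_cases h14 : c = 'E'
  · subst h14; decide
  by_cases h15 : c = 'F'
  · subst h15; decide
  simp [pvHexVal, h0, h1, h2, h3, h4, h5, h6, h7, h8, h9, h10, h11, h12, h13, h14, h15]

-- little-endian value of a digit list (proof-side view of both programs' values)
def pvLval : List Char → Int
  | [] => 0
  | c :: t => pvHexVal c + 16 * pvLval t

theorem pvEmodStep (d Δ K : Int) (hK : 0 < K) (hd0 : 0 ≤ d) (hd : d < 16) :
    (d + 16 * Δ) % (16 * K) = d + 16 * (Δ % K) := by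
  have h2 : d + 16 * Δ = (d + 16 * (Δ % K)) + (16 * K) * (Δ / K) := by
    have h1 := Int.mul_ediv_add_emod Δ K
    ring_nf
    linarith [h1]
  rw [h2, Int.add_mul_emod_self_left]
  have hr0 : 0 ≤ Δ % K := Int.emod_nonneg Δ (ne_of_gt hK)
  have hrK : Δ % K < K := Int.emod_lt_of_pos Δ hK
  have hmul : 16 * (Δ % K) ≤ 16 * (K - 1) := by linarith
  exact Int.emod_eq_of_lt (by linarith) (by linarith)

theorem pvPadHex_step (d M : Int) (k : Nat) (hd0 : 0 ≤ d) (hd : d < 16) :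
    pvPadHex (d + 16 * M) (k + 1) = pvPadHex M k ++ pvHexDigit d := by
  have h1 : (d + 16 * M) / 16 = M := by omega
  have h2 : (d + 16 * M) % 16 = d := by omega
  simp only [pvPadHex, h1, h2]

-- A's loop on the REVERSED padded digit lists (least-significant digit first)
def pvGoA : List Char → List Char → List Char → Int → List Char × Int
  | c1 :: t1, c2 :: t2, res, b =>
    let dt := pvHexVal c1 - pvHexVal c2 - b
    if dt < 0 then pvGoA t1 t2 (pvHexDigit (dt + 16) ++ res) 1
    else pvGoA t1 t2 (pvHexDigit dt ++ res) 0
  | _, _, res, b => (res, b)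

theorem pvGoA_eq_pad : ∀ (r1 r2 : List Char), r1.length = r2.length →
    ∀ (res : List Char) (b : Int), b = 0 ∨ b = 1 →
    (pvGoA r1 r2 res b).1 =
      pvPadHex ((pvLval r1 - pvLval r2 - b) % (16 ^ r1.length)) r1.length ++ res := by
  intro r1
  induction r1 with
  | nil =>
    intro r2 hlen res b _
    have : r2 = [] := List.length_eq_zero_iff.mp hlen.symm
    subst this
    simp [pvGoA, pvPadHex]
  | cons c1 t1 ih =>
    intro r2 hlen res b hb
    cases r2 with
    | nil => simp at hlen
    | cons c2 t2 =>
      have hlen' : t1.length = t2.length := by simpa using hlen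
      have hKpos : (0:Int) < 16 ^ t1.length := by positivity
      have hv1 := pvHexVal_bounds c1
      have hv2 := pvHexVal_bounds c2
      have hX : pvLval (c1 :: t1) - pvLval (c2 :: t2) - b
          = (pvHexVal c1 - pvHexVal c2 - b) + 16 * (pvLval t1 - pvLval t2) := by
        simp [pvLval]; ring
      by_cases hdt : pvHexVal c1 - pvHexVal c2 - b < 0
      · have hstep : (pvGoA (c1 :: t1) (c2 :: t2) res b).1
            = (pvGoA t1 t2 (pvHexDigit ((pvHexVal c1 - pvHexVal c2 - b) + 16) ++ res) 1).1 := by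
          simp only [pvGoA, if_pos hdt]
        rw [hstep, ih t2 hlen' _ 1 (Or.inr rfl)]
        have hXd : pvLval (c1 :: t1) - pvLval (c2 :: t2) - b
            = ((pvHexVal c1 - pvHexVal c2 - b) + 16) + 16 * ((pvLval t1 - pvLval t2) - 1) := by
          rw [hX]; ring
        rw [List.length_cons, pow_succ]
        have hpow' : (16:Int) ^ t1.length * 16 = 16 * 16 ^ t1.length := by ring
        rw [hXd, hpow', pvEmodStep _ _ _ hKpos (by omega) (by omega),
          pvPadHex_step _ _ _ (by omega) (by omega)]
        simp
      · have hstep : (pvGoA (c1 :: t1) (c2 :: t2) res b).1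
            = (pvGoA t1 t2 (pvHexDigit (pvHexVal c1 - pvHexVal c2 - b) ++ res) 0).1 := by
          simp only [pvGoA, if_neg hdt]
        rw [hstep, ih t2 hlen' _ 0 (Or.inl rfl)]
        rw [List.length_cons, pow_succ]
        have hpow' : (16:Int) ^ t1.length * 16 = 16 * 16 ^ t1.length := by ring
        rw [hX, hpow', pvEmodStep _ _ _ hKpos (by omega) (by omega),
          pvPadHex_step _ _ _ (by omega) (by omega)]
        simp

theorem pvLoopA_append : ∀ (k : Nat) (l1 l2 : List Char) (c d : Char) (st : List Char × Int),
    k ≤ l1.length → k ≤ l2.length →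
    pvLoopA (l1 ++ [c]) (l2 ++ [d]) k st = pvLoopA l1 l2 k st := by
  intro k
  induction k with
  | zero => intro l1 l2 c d st _ _; rfl
  | succ j ih =>
    intro l1 l2 c d st h1 h2
    obtain ⟨res, b⟩ := st
    have hj1 : j < l1.length := by omega
    have hj2 : j < l2.length := by omega
    simp only [pvLoopA, PySem.List.pyGet?_natCast,
      List.getElem?_append_left hj1, List.getElem?_append_left hj2]
    split
    · exact ih l1 l2 c d _ (by omega) (by omega)
    · exact ih l1 l2 c d _ (by omega) (by omega)

theorem pvLoopA_eq_goA : ∀ (r1 r2 : List Char), r1.length = r2.length →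
    ∀ (res : List Char) (b : Int),
    pvLoopA r1.reverse r2.reverse r1.length (res, b) = pvGoA r1 r2 res b := by
  intro r1
  induction r1 with
  | nil =>
    intro r2 hlen res b
    have : r2 = [] := List.length_eq_zero_iff.mp hlen.symm
    subst this; rfl
  | cons c1 t1 ih =>
    intro r2 hlen res b
    cases r2 with
    | nil => simp at hlen
    | cons c2 t2 =>
      have hlen' : t1.length = t2.length := by simpa using hlen
      have hg1 : (t1.reverse ++ [c1])[t1.length]? = some c1 := by
        rw [List.getElem?_append_right (by simp)]; simp
      have hg2 : (t2.reverse ++ [c2])[t1.length]? = some c2 := by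
        rw [List.getElem?_append_right (by simp [hlen'])]; simp [hlen']
      simp only [List.reverse_cons, List.length_cons, pvLoopA, pvGoA,
        PySem.List.pyGet?_natCast, hg1, hg2, Option.getD_some, hexval_eq]
      by_cases hdt : pvHexVal c1 - pvHexVal c2 - b < 0
      · rw [if_pos hdt, if_pos hdt,
          pvLoopA_append t1.length _ _ _ _ _ (by simp) (by simp [hlen']),
          ih t2 hlen']
      · rw [if_neg hdt, if_neg hdt,
          pvLoopA_append t1.length _ _ _ _ _ (by simp) (by simp [hlen']),
          ih t2 hlen']

theorem pvLval_append_singleton (x : List Char) (c : Char) :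
    pvLval (x ++ [c]) = pvLval x + pvHexVal c * 16 ^ x.length := by
  induction x with
  | nil => simp [pvLval]
  | cons y t ih => simp [pvLval, ih, List.length_cons, pow_succ]; ring

theorem pvFoldl_eq_lval_reverse : ∀ (l : List Char) (a : Int),
    l.foldl (fun a c => 16 * a + pvHexVal c) a = a * 16 ^ l.length + pvLval l.reverse := by
  intro l
  induction l with
  | nil => intro a; simp [pvLval]
  | cons c t ih =>
    intro a
    rw [List.foldl_cons, ih, List.reverse_cons, pvLval_append_singleton]
    simp [List.length_cons, pow_succ]
    ring

theorem pvLval_append_replicate_zero : ∀ (x : List Char) (k : Nat),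
    pvLval (x ++ List.replicate k '0') = pvLval x := by
  intro x
  induction x with
  | nil =>
    intro k
    induction k with
    | zero => simp
    | succ j ihk => simpa [List.replicate_succ, pvLval, pvHexVal] using ihk
  | cons c t ih => intro k; simp [pvLval, ih]

theorem completar_toList (s : String) (L : Int) (h : PySem.Str.len s ≤ L) :
    (completar_con_ceros s L).toList
      = List.replicate (L - PySem.Str.len s).toNat '0' ++ s.toList := by
  unfold completar_con_ceros
  split
  · next hle =>
      have h0 : (L - PySem.Str.len s).toNat = 0 := by omega
      rw [h0, List.replicate_zero, List.nil_append]
  · simp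

-- ===== VERDICT (by name: the statement is the Claim_ definition above) =====
theorem resta_hexadecimal_spec : Claim_equal_resta_hexadecimal := by
  intro n1 n2 _hdom _hpre
  unfold Spec_resta_hexadecimal resta_hexadecimal resta_hexadecimal_alt
  have h1 : PySem.Str.len n1 ≤ max (PySem.Str.len n1) (PySem.Str.len n2) := le_max_left _ _
  have h2 : PySem.Str.len n2 ≤ max (PySem.Str.len n1) (PySem.Str.len n2) := le_max_right _ _
  set L : Int := max (PySem.Str.len n1) (PySem.Str.len n2) with hLdef
  show String.ofList (pvLoopA (completar_con_ceros n1 L).toList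
      (completar_con_ceros n2 L).toList L.toNat ([], 0)).1
    = if L = 0 then ""
      else String.ofList (pvPadHex (PySem.Int.mod
        ((n1.toList.foldl (fun a c => 16 * a + pvHexVal c) 0)
          - (n2.toList.foldl (fun a c => 16 * a + pvHexVal c) 0)) (16 ^ L.toNat)) L.toNat)
  have hlen1 : PySem.Str.len n1 = (n1.toList.length : Int) := PySem.Str.len_eq n1
  have hlen2 : PySem.Str.len n2 = (n2.toList.length : Int) := PySem.Str.len_eq n2
  have hp1 := completar_toList n1 L h1
  have hp2 := completar_toList n2 L h2
  rw [hlen1] at h1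
  rw [hlen2] at h2
  have hlp1 : (completar_con_ceros n1 L).toList.length = L.toNat := by
    rw [hp1, List.length_append, List.length_replicate, hlen1]; omega
  have hlp2 : (completar_con_ceros n2 L).toList.length = L.toNat := by
    rw [hp2, List.length_append, List.length_replicate, hlen2]; omega
  have hA : pvLoopA (completar_con_ceros n1 L).toList (completar_con_ceros n2 L).toList
      L.toNat ([], 0)
      = pvGoA (completar_con_ceros n1 L).toList.reverse (completar_con_ceros n2 L).toList.reverse [] 0 := by
    have := pvLoopA_eq_goA (completar_con_ceros n1 L).toList.reverse
      (completar_con_ceros n2 L).toList.reverse (by simp [hlp1, hlp2]) [] 0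
    simpa [List.reverse_reverse, List.length_reverse, hlp1] using this
  have hpad := pvGoA_eq_pad (completar_con_ceros n1 L).toList.reverse
    (completar_con_ceros n2 L).toList.reverse (by simp [hlp1, hlp2]) [] 0 (Or.inl rfl)
  have hV1 : pvLval (completar_con_ceros n1 L).toList.reverse = pvLval n1.toList.reverse := by
    rw [hp1]
    rw [List.reverse_append, List.reverse_replicate]
    exact pvLval_append_replicate_zero _ _
  have hV2 : pvLval (completar_con_ceros n2 L).toList.reverse = pvLval n2.toList.reverse := by
    rw [hp2]
    rw [List.reverse_append, List.reverse_replicate]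
    exact pvLval_append_replicate_zero _ _
  have hF1 : n1.toList.foldl (fun a c => 16 * a + pvHexVal c) 0 = pvLval n1.toList.reverse := by
    rw [pvFoldl_eq_lval_reverse]; ring
  have hF2 : n2.toList.foldl (fun a c => 16 * a + pvHexVal c) 0 = pvLval n2.toList.reverse := by
    rw [pvFoldl_eq_lval_reverse]; ring
  by_cases hL0 : L = 0
  · have hnat : L.toNat = 0 := by omega
    have hr1 : (completar_con_ceros n1 L).toList = [] :=
      List.length_eq_zero_iff.mp (by rw [hlp1, hnat])
    have hr2 : (completar_con_ceros n2 L).toList = [] :=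
      List.length_eq_zero_iff.mp (by rw [hlp2, hnat])
    rw [hnat, hr1, hr2, if_pos hL0]
    rfl
  · have hpos : (0:Int) < 16 ^ L.toNat := by positivity
    rw [hA, hpad, if_neg hL0]
    rw [PySem.Int.mod_eq_emod_of_pos hpos, hF1, hF2]
    rw [List.length_reverse, hlp1, hV1, hV2]
    simp
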